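-- pv_equiv track=rewrite | github.com/eunzi-kim/AL-S | 은지/LV1/문자열 내 p와 y의 개수.py | solution
-- ===== SOURCE A (Python) =====
-- def solution(s):
--     cnt_p = cnt_y = 0
--     for x in s:
--         if x == 'p' or x == 'P':
--             cnt_p += 1
--         elif x == 'y' or x == 'Y':
--             cnt_y += 1
--     if cnt_p == cnt_y:
--         answer = True
--     else:
--         answer = False
--     return answer
-- ===== SOURCE B (Python) =====
-- def solution(s):
--     # Cancellation stack (bracket-matching style): an unmatched-letter stack where
--     # each p cancels a pending y and vice versa; counts are equal iff it empties.
--     stack = []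
--     for ch in s:
--         if ch == 'p' or ch == 'P':
--             if stack and stack[-1] == 'y':
--                 stack.pop()
--             else:
--                 stack.append('p')
--         elif ch == 'y' or ch == 'Y':
--             if stack and stack[-1] == 'p':
--                 stack.pop()
--             else:
--                 stack.append('y')
--     return not stack
-- ===== Notes on version B (the rewrite author's own statement) =====
-- stated objective: alternative
-- what changed: B replaces A's two-counter tally-and-compare with a bracket-matching cancellation stack: each p/y letter pops an opposite unmatched letter or is pushed, and the answer is whether the stack is empty at the end.
import Mathlib
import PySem

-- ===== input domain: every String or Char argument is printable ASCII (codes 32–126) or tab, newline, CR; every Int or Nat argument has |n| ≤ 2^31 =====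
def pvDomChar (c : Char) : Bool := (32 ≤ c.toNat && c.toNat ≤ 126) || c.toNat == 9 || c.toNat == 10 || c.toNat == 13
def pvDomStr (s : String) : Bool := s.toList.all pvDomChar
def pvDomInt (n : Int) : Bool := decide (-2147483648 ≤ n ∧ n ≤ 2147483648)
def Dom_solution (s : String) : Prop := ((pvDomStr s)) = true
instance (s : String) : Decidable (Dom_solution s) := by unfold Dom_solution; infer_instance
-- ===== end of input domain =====

-- B replaces A's two-counter tally with a cancellation stack (bracket-matching style):
-- each p/y letter cancels an opposite unmatched letter or is pushed; answer = stack empty. Same cost.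

-- ===== PORT A =====
def solution (s : String) : Bool :=
  let counts : Int × Int := s.toList.foldl
    (fun (acc : Int × Int) x =>
      if x == 'p' || x == 'P' then (acc.1 + 1, acc.2)
      else if x == 'y' || x == 'Y' then (acc.1, acc.2 + 1)
      else acc)
    (0, 0)
  if counts.1 == counts.2 then true else false

-- ===== PORT B =====
def pyStep (st : List Char) (ch : Char) : List Char :=
  if ch == 'p' || ch == 'P' then
    if !st.isEmpty && st.getLast? == some 'y' then st.dropLast else st ++ ['p']
  else if ch == 'y' || ch == 'Y' then
    if !st.isEmpty && st.getLast? == some 'p' then st.dropLast else st ++ ['y']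
  else st

def solution_alt (s : String) : Bool :=
  (s.toList.foldl pyStep []).isEmpty

-- ===== PRECONDITION & SPEC =====
def Spec_solution (s : String) (out : Bool) : Prop := out = solution_alt s
instance (s : String) (out : Bool) : Decidable (Spec_solution s out) := by unfold Spec_solution; infer_instance

-- ===== CLAIM =====
def Claim_equal_solution : Prop := ∀ (s : String), Dom_solution s → Spec_solution s (solution s)

-- ===== LEMMAS AND PROOFS =====

-- canonical stack holding the |cp - cy| unmatched letters
def mkStack (cp cy : Nat) : List Char :=
  List.replicate (cp - cy) 'p' ++ List.replicate (cy - cp) 'y'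

theorem rep_last (n : Nat) (a : Char) (h : n ≠ 0) :
    (List.replicate n a).getLast? = some a := by
  cases n with
  | zero => simp at h
  | succ m => rw [List.replicate_succ', List.getLast?_concat]

theorem rep_dropLast (n : Nat) (a : Char) :
    (List.replicate n a).dropLast = List.replicate (n - 1) a := by
  cases n with
  | zero => simp
  | succ m =>
    rw [List.replicate_succ', List.dropLast_append_of_ne_nil (by simp)]
    simp

theorem pyStep_p (cp cy : Nat) : pyStep (mkStack cp cy) 'p' = mkStack (cp + 1) cy := by
  unfold pyStep mkStack
  rcases Nat.lt_or_ge cp cy with h | h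
  · have h1 : cp - cy = 0 := by omega
    have h4 : cp + 1 - cy = 0 := by omega
    have h3 : cy - (cp + 1) = cy - cp - 1 := by omega
    have hne : cy - cp ≠ 0 := by omega
    rw [h1, h4, h3]
    simp [rep_last _ _ hne, rep_dropLast, List.replicate_eq_nil_iff, hne]
  · have h1 : cy - cp = 0 := by omega
    have h3 : cy - (cp + 1) = 0 := by omega
    have h2 : cp + 1 - cy = (cp - cy) + 1 := by omega
    rw [h1, h2, h3]
    rcases Nat.eq_zero_or_pos (cp - cy) with h0 | h0
    · rw [h0]; simp [List.replicate_succ]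
    · simp [List.replicate_succ']
      intro _ hcontra
      rw [rep_last _ _ (by omega : cp - cy ≠ 0)] at hcontra
      simp at hcontra

theorem pyStep_y (cp cy : Nat) : pyStep (mkStack cp cy) 'y' = mkStack cp (cy + 1) := by
  unfold pyStep mkStack
  rcases Nat.lt_or_ge cy cp with h | h
  · have h1 : cy - cp = 0 := by omega
    have h4 : cy + 1 - cp = 0 := by omega
    have h3 : cp - (cy + 1) = cp - cy - 1 := by omega
    have hne : cp - cy ≠ 0 := by omega
    rw [h1, h4, h3]
    simp [rep_last _ _ hne, rep_dropLast, List.replicate_eq_nil_iff, hne]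
  · have h1 : cp - cy = 0 := by omega
    have h3 : cp - (cy + 1) = 0 := by omega
    have h2 : cy + 1 - cp = (cy - cp) + 1 := by omega
    rw [h1, h2, h3]
    rcases Nat.eq_zero_or_pos (cy - cp) with h0 | h0
    · rw [h0]; simp [List.replicate_succ]
    · simp [List.replicate_succ']
      intro _ hcontra
      rw [rep_last _ _ (by omega : cy - cp ≠ 0)] at hcontra
      simp at hcontra

theorem pyStep_P (cp cy : Nat) : pyStep (mkStack cp cy) 'P' = mkStack (cp + 1) cy := by
  have h := pyStep_p cp cy
  simp only [pyStep] at h ⊢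
  simpa using h

theorem pyStep_Y (cp cy : Nat) : pyStep (mkStack cp cy) 'Y' = mkStack cp (cy + 1) := by
  have h := pyStep_y cp cy
  simp only [pyStep] at h ⊢
  simpa using h

theorem pyStep_other (st : List Char) (x : Char) (hp : x ≠ 'p') (hP : x ≠ 'P')
    (hy : x ≠ 'y') (hY : x ≠ 'Y') : pyStep st x = st := by
  simp [pyStep, hp, hP, hy, hY]

theorem foldB (l : List Char) (cp cy : Nat) :
    l.foldl pyStep (mkStack cp cy)
      = mkStack (cp + (l.count 'p' + l.count 'P')) (cy + (l.count 'y' + l.count 'Y')) := by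
  induction l generalizing cp cy with
  | nil => simp
  | cons x l ih =>
    simp only [List.foldl_cons, List.count_cons]
    by_cases hp : x = 'p'
    · subst hp; rw [pyStep_p, ih]; congr 1 <;> simp <;> omega
    · by_cases hP : x = 'P'
      · subst hP; rw [pyStep_P, ih]; congr 1 <;> simp [hp] <;> omega
      · by_cases hy : x = 'y'
        · subst hy; rw [pyStep_y, ih]; congr 1 <;> simp [hp, hP] <;> omega
        · by_cases hY : x = 'Y'
          · subst hY; rw [pyStep_Y, ih]; congr 1 <;> simp [hp, hP, hy] <;> omega
          · rw [pyStep_other _ _ hp hP hy hY, ih]; congr 1 <;> simp [hp, hP, hy, hY]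

theorem mkStack_isEmpty (a b : Nat) : (mkStack a b).isEmpty = decide (a = b) := by
  unfold mkStack
  rcases Nat.lt_trichotomy a b with h | h | h
  · have h1 : a - b = 0 := by omega
    have hd : decide (a = b) = false := by simp; omega
    rw [h1, hd]
    simp [List.isEmpty_eq_false_iff, List.replicate_eq_nil_iff]
    omega
  · subst h; simp
  · have h1 : b - a = 0 := by omega
    have hd : decide (a = b) = false := by simp; omega
    rw [h1, hd]
    simp [List.isEmpty_eq_false_iff, List.replicate_eq_nil_iff]
    omega

theorem foldA (l : List Char) (p y : Int) :
    l.foldl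
      (fun (acc : Int × Int) x =>
        if x == 'p' || x == 'P' then (acc.1 + 1, acc.2)
        else if x == 'y' || x == 'Y' then (acc.1, acc.2 + 1)
        else acc)
      (p, y)
    = (p + (l.count 'p' + l.count 'P' : Nat), y + (l.count 'y' + l.count 'Y' : Nat)) := by
  induction l generalizing p y with
  | nil => simp
  | cons x l ih =>
    simp only [List.foldl_cons]
    by_cases hp : x = 'p' <;> by_cases hP : x = 'P' <;>
      by_cases hy : x = 'y' <;> by_cases hY : x = 'Y' <;>
      simp_all <;> push_cast <;> ring

-- ===== VERDICT =====
theorem solution_spec : Claim_equal_solution := by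
  intro s _
  unfold Spec_solution solution solution_alt
  have hB : s.toList.foldl pyStep [] =
      mkStack (0 + (s.toList.count 'p' + s.toList.count 'P'))
              (0 + (s.toList.count 'y' + s.toList.count 'Y')) := by
    have h := foldB s.toList 0 0
    simpa [mkStack] using h
  rw [hB, foldA s.toList 0 0, mkStack_isEmpty]
  by_cases hc : s.toList.count 'p' + s.toList.count 'P'
      = s.toList.count 'y' + s.toList.count 'Y'
  · simp [hc]
  · simp [hc]
    exact fun h => hc (by exact_mod_cast h)
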